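-- pv_equiv track=rewrite | github.com/BruceCodin/practice-coding-problems | advent-code-2021/day-2/b.py | get_horizontal_depth
-- ===== SOURCE A (Python) =====
-- def parse_command(line:str) -> tuple[str,int]:
--     """Parse each line and separate into direction and unit"""
--     direction, value_str = line.split()
--     return direction, int(value_str)
--
-- def get_horizontal_depth(readlines_input: list[str], aim: int = 0) -> tuple[int,int]:
--     """Get the total horziontal and depth values"""
--     horizontal = 0
--     depth = 0
--
--     for line in readlines_input:
--         direction, units = parse_command(line)
--
--         if direction == "forward":
--             horizontal += units
--             depth += units * aim
--         else:
--             aim += units if direction == "down" else -units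
--
--     return horizontal, depth
-- ===== SOURCE B (Python) =====
-- def get_horizontal_depth(readlines_input: list[str], aim: int = 0) -> tuple[int, int]:
--     """Get the total horizontal and depth values"""
--     commands = []
--     for line in readlines_input:
--         direction, value_str = line.split()
--         commands.append((direction, int(value_str)))
--
--     horizontal = sum(u for d, u in commands if d == "forward")
--
--     # aims[i] = the aim in effect just before command i (running accumulation of signed deltas)
--     aims = []
--     a = aim
--     for d, u in commands:
--         aims.append(a)
--         a += u if d == "down" else 0 if d == "forward" else -u
--
--     depth = sum(u * ai for (d, u), ai in zip(commands, aims) if d == "forward")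
--     return horizontal, depth
-- ===== Notes on version B (the rewrite author's own statement) =====
-- stated objective: alternative
-- what changed: Replaces the single stateful loop threading (horizontal, depth, aim) with a parse-once pipeline: horizontal is a filtered sum over forward commands, the aim trajectory is built separately by accumulating signed deltas, and depth is a second filtered sum pairing each forward command with the aim accumulated before it.
import Mathlib
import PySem

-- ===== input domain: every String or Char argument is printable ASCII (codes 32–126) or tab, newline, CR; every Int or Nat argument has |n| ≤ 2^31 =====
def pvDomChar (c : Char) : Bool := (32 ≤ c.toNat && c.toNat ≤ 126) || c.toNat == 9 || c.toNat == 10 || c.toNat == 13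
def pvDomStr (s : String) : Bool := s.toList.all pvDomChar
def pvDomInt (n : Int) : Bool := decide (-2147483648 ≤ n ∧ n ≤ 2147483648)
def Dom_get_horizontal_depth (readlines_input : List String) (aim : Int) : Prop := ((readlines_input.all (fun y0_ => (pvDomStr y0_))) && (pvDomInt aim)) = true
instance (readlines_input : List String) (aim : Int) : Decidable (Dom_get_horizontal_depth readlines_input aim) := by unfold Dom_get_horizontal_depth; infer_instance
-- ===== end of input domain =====

-- B replaces A's single stateful loop with a parse-once pipeline (filtered sums + an accumulated aim trajectory); same cost, alternative decomposition.


-- ===== PORT A =====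
-- parse_command: 'direction, value_str = line.split(); return direction, int(value_str)';
-- none exactly where Python raises (ValueError on unpack or on int()).
def parse_command (line : String) : Option (String × Int) :=
  match PySem.Str.split₀ line with
  | [direction, value_str] => (PySem.Int.ofStr? value_str).map (fun v => (direction, v))
  | _ => none

-- the body of A's for-loop, on state (horizontal, depth, aim)
def stepA (st : Int × Int × Int) (c : String × Int) : Int × Int × Int :=
  if c.1 == "forward" then (st.1 + c.2, st.2.1 + c.2 * st.2.2, st.2.2)
  else (st.1, st.2.1, st.2.2 + (if c.1 == "down" then c.2 else -c.2))

def get_horizontal_depth (readlines_input : List String) (aim : Int) : Int × Int :=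
  match readlines_input.foldl
      (fun st line => st.bind (fun s => (parse_command line).map (fun c => stepA s c)))
      (some ((0 : Int), (0 : Int), aim)) with
  | some (h, d, _) => (h, d)
  | none => (0, 0)  -- unreachable under Pre_: Python raises here

-- ===== PORT B =====
-- the first loop of Source B: parse every line into (direction, units); none where parsing raises
def parse_all : List String → Option (List (String × Int))
  | [] => some []
  | l :: ls =>
    match PySem.Str.split₀ l with
    | [d, v] =>
      match PySem.Int.ofStr? v with
      | some n => (parse_all ls).map (fun cs => (d, n) :: cs)
      | none => none
    | _ => none

-- the signed delta of Source B: u if d=="down" else 0 if d=="forward" else -u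
def deltaB (c : String × Int) : Int :=
  if c.1 == "down" then c.2 else if c.1 == "forward" then 0 else -c.2

-- the second loop of Source B: aims[i] = aim in effect before command i
def aimsOf : List (String × Int) → Int → List Int
  | [], _ => []
  | c :: cs, a => a :: aimsOf cs (a + deltaB c)

def get_horizontal_depth_alt (readlines_input : List String) (aim : Int) : Int × Int :=
  match parse_all readlines_input with
  | none => (0, 0)  -- unreachable under Pre_: Python raises here
  | some cmds =>
    let horizontal := ((cmds.filter (fun c => c.1 == "forward")).map (fun c => c.2)).sum
    let aims := aimsOf cmds aim
    let depth := (((cmds.zip aims).filter (fun p => p.1.1 == "forward")).map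
        (fun p => p.1.2 * p.2)).sum
    (horizontal, depth)

-- ===== PRECONDITION & SPEC =====
-- Pre_ excludes exactly the inputs on which A raises: a line that does not split into
-- exactly two whitespace-separated fields (ValueError on unpacking) or whose second
-- field is not int()-parseable (ValueError).
def Pre_get_horizontal_depth (readlines_input : List String) (aim : Int) : Prop :=
  ∀ line ∈ readlines_input,
    (PySem.Str.split₀ line).length = 2 ∧
    (PySem.Int.ofStr? ((PySem.Str.split₀ line).getD 1 "")).isSome = true
instance (readlines_input : List String) (aim : Int) : Decidable (Pre_get_horizontal_depth readlines_input aim) := by unfold Pre_get_horizontal_depth; infer_instance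

def pvWitness_get_horizontal_depth : List String × Int :=
  (["forward 3", "down 2", "forward 1", "up 1"], 0)

def Spec_get_horizontal_depth (readlines_input : List String) (aim : Int) (out : Int × Int) : Prop := out = get_horizontal_depth_alt readlines_input aim
instance (readlines_input : List String) (aim : Int) (out : Int × Int) : Decidable (Spec_get_horizontal_depth readlines_input aim out) := by unfold Spec_get_horizontal_depth; infer_instance

-- ===== CLAIM (what is proved, stated in full; the proofs are below) =====
def Claim_equal_get_horizontal_depth : Prop := ∀ (readlines_input : List String) (aim : Int), Dom_get_horizontal_depth readlines_input aim → Pre_get_horizontal_depth readlines_input aim → Spec_get_horizontal_depth readlines_input aim (get_horizontal_depth readlines_input aim)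

-- ===== LEMMAS AND PROOFS =====

-- Under Pre_, B's parse phase succeeds.
theorem parse_all_isSome (lines : List String)
    (h : ∀ line ∈ lines,
      (PySem.Str.split₀ line).length = 2 ∧
      (PySem.Int.ofStr? ((PySem.Str.split₀ line).getD 1 "")).isSome = true) :
    (parse_all lines).isSome = true := by
  induction lines with
  | nil => rfl
  | cons l ls ih =>
    obtain ⟨h1, h2⟩ := h l (by simp)
    match hs : PySem.Str.split₀ l with
    | [d, v] =>
      simp [hs] at h2
      obtain ⟨n, hn⟩ := Option.isSome_iff_exists.mp h2
      have := ih (fun x hx => h x (by simp [hx]))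
      obtain ⟨cs, hcs⟩ := Option.isSome_iff_exists.mp this
      simp [parse_all, hs, hn, hcs]
    | [] => simp [hs] at h1
    | [x] => simp [hs] at h1
    | x :: y :: z :: r => simp [hs] at h1

-- A's Option-threaded fold over lines equals the pure fold over the parsed commands.
theorem foldA_eq (lines : List String) :
    ∀ (cmds : List (String × Int)) (st : Int × Int × Int),
    parse_all lines = some cmds →
    lines.foldl (fun st line => st.bind (fun s => (parse_command line).map (fun c => stepA s c)))
        (some st) = some (cmds.foldl stepA st) := by
  induction lines with
  | nil => intro cmds st h; simp [parse_all] at h; subst h; rfl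
  | cons l ls ih =>
    intro cmds st h
    match hs : PySem.Str.split₀ l with
    | [d, v] =>
      simp only [parse_all, hs] at h
      match hn : PySem.Int.ofStr? v with
      | some n =>
        rw [hn] at h
        match hrest : parse_all ls with
        | some cs =>
          rw [hrest] at h
          simp at h
          subst h
          simp only [List.foldl_cons, parse_command, hs, hn, Option.bind_some, Option.map_some]
          exact ih cs (stepA st (d, n)) hrest
        | none => rw [hrest] at h; simp at h
      | none => rw [hn] at h; simp at h
    | [] => simp [parse_all, hs] at h
    | [x] => simp [parse_all, hs] at h
    | x :: y :: z :: r => simp [parse_all, hs] at h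

-- The pure fold computes B's two filtered sums.
theorem foldA_spec (cmds : List (String × Int)) :
    ∀ (h d a : Int),
    cmds.foldl stepA (h, d, a) =
      (h + ((cmds.filter (fun c => c.1 == "forward")).map (fun c => c.2)).sum,
       d + (((cmds.zip (aimsOf cmds a)).filter (fun p => p.1.1 == "forward")).map
            (fun p => p.1.2 * p.2)).sum,
       a + (cmds.map deltaB).sum) := by
  induction cmds with
  | nil => intro h d a; simp
  | cons c cs ih =>
    intro h d a
    obtain ⟨dir, u⟩ := c
    by_cases hf : dir = "forward"
    · subst hf
      have hstep : stepA (h, d, a) ("forward", u) = (h + u, d + u * a, a) := by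
        simp [stepA]
      have hdelta : deltaB ("forward", u) = 0 := by simp [deltaB]
      simp only [List.foldl_cons, hstep, ih, aimsOf, hdelta, add_zero, List.zip_cons_cons,
        List.filter_cons, List.map_cons, beq_self_eq_true, if_pos, List.sum_cons]
      simp only [Prod.mk.injEq]
      refine ⟨by ring, by ring, by ring⟩
    · have hfb : (dir == "forward") = false := by simp [hf]
      have hstep : stepA (h, d, a) (dir, u) = (h, d, a + deltaB (dir, u)) := by
        simp [stepA, deltaB, hfb]
      simp only [List.foldl_cons, hstep, ih, aimsOf, List.zip_cons_cons,
        List.filter_cons, List.map_cons, List.sum_cons, hfb, Bool.false_eq_true, if_neg,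
        not_false_eq_true]
      simp only [Prod.mk.injEq]
      exact ⟨trivial, trivial, by ring⟩

-- ===== VERDICT (by name: the statement is the Claim_ definition above) =====
theorem get_horizontal_depth_spec : Claim_equal_get_horizontal_depth := by
  intro lines aim _ hpre
  unfold Spec_get_horizontal_depth
  obtain ⟨cmds, hcmds⟩ := Option.isSome_iff_exists.mp (parse_all_isSome lines hpre)
  unfold get_horizontal_depth get_horizontal_depth_alt
  rw [foldA_eq lines cmds (0, 0, aim) hcmds, hcmds, foldA_spec]
  simp
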